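-- pv_equiv track=rewrite | github.com/y-ncao/Python-Study | Ninja/Leetcode/65_Valid_Number.py | isNumberwoE
-- ===== SOURCE A (Python) =====
-- def isNumberwoE(s, allow_digit = True):
--     has_num = False
--     for i, char in enumerate(s):
--         if i == 0 and char in ['+', '-']:
--             continue
--         if char == '.' and allow_digit:
--             allow_digit = False
--             continue
--         if char.isdigit():
--             has_num = True
--             continue
--         return False
--     return has_num
-- ===== SOURCE B (Python) =====
-- def isNumberwoE(s, allow_digit=True):
--     rest = s[1:] if s[:1] in ('+', '-') else s
--     if allow_digit:
--         if rest.count('.') > 1: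
--             return False
--         rest = rest.replace('.', '')
--     return bool(rest) and all(c.isdigit() for c in rest)
-- ===== Notes on version B (the rewrite author's own statement) =====
-- stated objective: simpler
-- what changed: Replaced the indexed single-pass state machine (allow_digit/has_num flags with early return) by a strip-sign / count-dots / remove-dot / all-digits decomposition using count, replace and all.
import Mathlib
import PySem

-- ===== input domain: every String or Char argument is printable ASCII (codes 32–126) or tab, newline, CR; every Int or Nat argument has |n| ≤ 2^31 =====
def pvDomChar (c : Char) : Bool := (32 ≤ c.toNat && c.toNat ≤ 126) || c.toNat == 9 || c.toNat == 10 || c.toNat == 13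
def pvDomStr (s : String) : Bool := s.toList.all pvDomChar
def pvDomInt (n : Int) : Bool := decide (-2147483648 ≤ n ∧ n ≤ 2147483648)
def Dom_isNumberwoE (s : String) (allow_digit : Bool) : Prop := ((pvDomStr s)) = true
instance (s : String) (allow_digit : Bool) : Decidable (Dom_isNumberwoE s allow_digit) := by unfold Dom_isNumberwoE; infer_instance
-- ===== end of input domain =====

-- B replaces A's indexed single-pass state machine by a strip-sign / count-dots / all-digits decomposition (objective: simpler).

-- ===== PORT A =====
-- the 'for i, char in enumerate(s)' loop: state = (allow_digit, has_num), early 'return False'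
def isNumberwoE_go : List Char → Nat → Bool → Bool → Bool
  | [], _, _, has_num => has_num
  | c :: cs, i, allow_digit, has_num =>
    if i = 0 && (c == '+' || c == '-') then isNumberwoE_go cs (i + 1) allow_digit has_num
    else if c == '.' && allow_digit then isNumberwoE_go cs (i + 1) false has_num
    else if PySem.Chars.isdigit c then isNumberwoE_go cs (i + 1) allow_digit true
    else false

def isNumberwoE (s : String) (allow_digit : Bool) : Bool :=
  isNumberwoE_go s.toList 0 allow_digit false

-- ===== PORT B =====
-- rest = s[1:] if s[:1] in ('+','-') else s ; count('.'), replace('.','') (= removing every '.'), all(c.isdigit())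
def isNumberwoE_alt (s : String) (allow_digit : Bool) : Bool :=
  let l := s.toList
  let rest := if l.take 1 = ['+'] || l.take 1 = ['-'] then l.drop 1 else l
  if allow_digit then
    if rest.count '.' > 1 then false
    else
      let r := rest.filter (fun c => c ≠ '.')
      !r.isEmpty && r.all PySem.Chars.isdigit
  else
    !rest.isEmpty && rest.all PySem.Chars.isdigit

-- ===== PRECONDITION & SPEC =====
def Spec_isNumberwoE (s : String) (allow_digit : Bool) (out : Bool) : Prop := out = isNumberwoE_alt s allow_digit
instance (s : String) (allow_digit : Bool) (out : Bool) : Decidable (Spec_isNumberwoE s allow_digit out) := by unfold Spec_isNumberwoE; infer_instance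

-- ===== CLAIM (what is proved, stated in full; the proofs are below) =====
def Claim_equal_isNumberwoE : Prop := ∀ (s : String) (allow_digit : Bool), Dom_isNumberwoE s allow_digit → Spec_isNumberwoE s allow_digit (isNumberwoE s allow_digit)

-- ===== LEMMAS AND PROOFS =====

theorem pvAll_ext {l : List Char} {p q : Char → Bool} (h : ∀ a ∈ l, p a = q a) :
    l.all p = l.all q := by
  induction l with
  | nil => rfl
  | cons a l ih => simp_all

theorem pvCount_le_one (n : Nat) : decide (n ≤ 1) = !decide (1 < n) := by
  by_cases h : n ≤ 1 <;> simp [h] <;> omega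

-- closed form of the loop from index ≥ 1 (the sign branch can no longer fire)
theorem isNumberwoE_go_pos (cs : List Char) :
    ∀ (i : Nat) (allow has : Bool),
      isNumberwoE_go cs (i + 1) allow has =
        (if allow then
          decide (cs.count '.' ≤ 1) &&
            (!(cs.filter (fun c => c ≠ '.')).isEmpty || has) &&
            (cs.filter (fun c => c ≠ '.')).all PySem.Chars.isdigit
        else
          (!cs.isEmpty || has) && cs.all PySem.Chars.isdigit) := by
  induction cs with
  | nil => intro i allow has; cases allow <;> simp [isNumberwoE_go]
  | cons c cs ih =>
    intro i allow has
    by_cases hdot : c = '.'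
    · subst hdot
      cases allow with
      | false =>
        simp [isNumberwoE_go, PySem.Chars.isdigit]
      | true =>
        rw [show isNumberwoE_go ('.' :: cs) (i + 1) true has
              = isNumberwoE_go cs (i + 1 + 1) false has by simp [isNumberwoE_go]]
        rw [ih]
        by_cases h0 : cs.count '.' = 0
        · have hnd : ∀ a ∈ cs, a ≠ '.' := by
            intro a ha hc; subst hc
            have := List.count_pos_iff.2 ha
            omega
          have hf : cs.filter (fun c => !decide (c = '.')) = cs := by
            apply List.filter_eq_self.2
            intro a ha; simp [hnd a ha]
          have hall : (cs.all fun a => decide (a = '.') || PySem.Chars.isdigit a)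
              = cs.all PySem.Chars.isdigit := by
            apply pvAll_ext; intro a ha; simp [hnd a ha]
          simp [List.count_cons, h0, hf, hall]
        · have h1 : ¬ (('.' :: cs).count '.' ≤ 1) := by
            simp [List.count_cons]; omega
          have hm : '.' ∈ cs := List.count_pos_iff.1 (Nat.pos_of_ne_zero h0)
          have h2 : cs.all PySem.Chars.isdigit = false := by
            cases hc : cs.all PySem.Chars.isdigit
            · rfl
            · exfalso
              have := List.all_eq_true.1 hc _ hm
              simp [PySem.Chars.isdigit] at this
          simp [h1, h2]
          intro hc
          exact absurd hc h0
    · by_cases hdig : PySem.Chars.isdigit c = true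
      · have hgo : ∀ a, isNumberwoE_go (c :: cs) (i + 1) a has
              = isNumberwoE_go cs (i + 1 + 1) a true := by
          intro a
          cases a <;> simp [isNumberwoE_go, hdot, hdig]
        cases allow with
        | false =>
          rw [hgo, ih]
          simp [hdig]
        | true =>
          rw [hgo, ih]
          simp [List.count_cons, hdot, hdig, List.filter_cons]
      · have hgo : isNumberwoE_go (c :: cs) (i + 1) allow has = false := by
          cases allow <;> simp [isNumberwoE_go, hdot, hdig]
        rw [hgo]
        cases allow with
        | false => simp [hdig]
        | true =>
          simp only [if_pos rfl]
          simp [List.filter_cons, hdot, hdig]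

-- the index argument is irrelevant once it is positive
theorem isNumberwoE_go_idx (cs : List Char) (i j : Nat) (a h : Bool) :
    isNumberwoE_go cs (i + 1) a h = isNumberwoE_go cs (j + 1) a h :=
  (isNumberwoE_go_pos cs i a h).trans (isNumberwoE_go_pos cs j a h).symm

-- a non-sign first character: starting at index 0 is the same as starting at index 1
theorem isNumberwoE_go_zero_nosign (c : Char) (cs : List Char) (a : Bool)
    (h1 : c ≠ '+') (h2 : c ≠ '-') :
    isNumberwoE_go (c :: cs) 0 a false = isNumberwoE_go (c :: cs) 1 a false := by
  have e1 := isNumberwoE_go_idx cs 0 1 false false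
  have e2 := isNumberwoE_go_idx cs 0 1 false true
  have e3 := isNumberwoE_go_idx cs 0 1 a true
  norm_num at e1 e2 e3
  cases a <;> simp [isNumberwoE_go, h1, h2] <;>
    by_cases hdot : c = '.' <;> simp [hdot, e1, e2, e3]

-- ===== VERDICT (by name: the statement is the Claim_ definition above) =====
theorem isNumberwoE_spec : Claim_equal_isNumberwoE := by
  intro s allow _
  unfold Spec_isNumberwoE isNumberwoE isNumberwoE_alt
  cases hl : s.toList with
  | nil => cases allow <;> simp [isNumberwoE_go]
  | cons c cs =>
    by_cases hsign : c = '+' ∨ c = '-'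
    · have h1 : isNumberwoE_go (c :: cs) 0 allow false
          = isNumberwoE_go cs 1 allow false := by
        rcases hsign with h | h <;> subst h <;> simp [isNumberwoE_go]
      have h2 : ((c :: cs).take 1 = ['+'] || (c :: cs).take 1 = ['-']) = true := by
        rcases hsign with h | h <;> subst h <;> simp
      rw [h1, show (1 : Nat) = 0 + 1 from rfl, isNumberwoE_go_pos]
      simp only [h2, if_pos, List.drop_one, List.tail_cons]
      cases allow <;> simp [pvCount_le_one, Bool.and_assoc]
    · push_neg at hsign
      have h1 := isNumberwoE_go_zero_nosign c cs allow hsign.1 hsign.2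
      have h2 : ((c :: cs).take 1 = ['+'] || (c :: cs).take 1 = ['-']) = false := by
        simp [hsign.1, hsign.2]
      rw [h1, show (1 : Nat) = 0 + 1 from rfl, isNumberwoE_go_pos]
      simp only [h2, Bool.false_eq_true, if_neg]
      cases allow <;> simp [pvCount_le_one, Bool.and_assoc]
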